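-- pv_equiv track=rewrite | github.com/RiffLord/esercizi-python | char-freq/program01.py | max_freq_by_pos
-- ===== SOURCE A (Python) =====
-- def max_freq_by_pos(strings: str) -> str:
-- 	output = ''
-- 	i = 0
-- 	while i < len(strings):
-- 		max_freq = {}
-- 		for c in sorted(strings[i]):
-- 			max_freq[c] = max_freq.get(c, 0) + 1
-- 		output += max(max_freq, key=max_freq.get)
-- 		i += 1
-- 	return output
-- 	pass
-- ===== SOURCE B (Python) =====
-- def max_freq_by_pos(strings):
--     out = []
--     for s in strings:
--         cs = sorted(s)
--         # group consecutive equal chars of the sorted string into runs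
--         runs = []
--         i, n = 0, len(cs)
--         while i < n:
--             j = i
--             while j < n and cs[j] == cs[i]:
--                 j += 1
--             runs.append((cs[i], j - i))
--             i = j
--         # first run of maximal length: smallest char wins ties (runs are sorted)
--         best, best_n = runs[0]
--         for c, m in runs[1:]:
--             if m > best_n:
--                 best, best_n = c, m
--         out.append(best)
--     return ''.join(out)
-- ===== Notes on version B (the rewrite author's own statement) =====
-- stated objective: alternative
-- what changed: Per string, B replaces A's character-frequency dict plus max(dict, key=dict.get) by a run-length scan over the sorted characters: group consecutive equal chars into runs and keep the first (hence smallest-char) longest run.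
import Mathlib
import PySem

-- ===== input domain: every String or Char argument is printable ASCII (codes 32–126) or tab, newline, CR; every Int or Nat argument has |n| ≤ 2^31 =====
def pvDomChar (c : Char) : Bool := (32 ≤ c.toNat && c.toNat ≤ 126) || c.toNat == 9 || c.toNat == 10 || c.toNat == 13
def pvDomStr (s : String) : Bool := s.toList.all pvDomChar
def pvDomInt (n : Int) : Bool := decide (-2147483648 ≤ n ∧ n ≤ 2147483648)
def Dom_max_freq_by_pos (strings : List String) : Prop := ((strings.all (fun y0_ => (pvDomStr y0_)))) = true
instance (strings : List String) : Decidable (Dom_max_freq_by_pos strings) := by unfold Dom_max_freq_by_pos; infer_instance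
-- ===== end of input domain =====

-- B replaces A's per-string counting dict + max(dict, key=get) by a run-length scan over the
-- sorted characters (group consecutive equal chars, keep the first longest run); alternative
-- decomposition, same asymptotic cost.


-- ===== PORT A =====
-- per-string dict loop: for c in sorted(s): max_freq[c] = max_freq.get(c, 0) + 1
def pvACount (s : String) : PySem.Dict Char Int :=
  (PySem.List.sorted s.toList (fun c => c) false).foldl
    (fun d c => d.insert c (d.getD c 0 + 1)) PySem.Dict.empty

-- max(max_freq, key=max_freq.get); none = Python's ValueError on an empty dict (excluded by Pre_)
def pvAChar (s : String) : Option Char :=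
  PySem.List.max? (PySem.Dict.keys (pvACount s)) (fun k => (pvACount s).getD k 0)

def max_freq_by_pos (strings : List String) : String :=
  strings.foldl (fun out s =>
    match pvAChar s with
    | some c => out.push c
    | none => out) ""

-- ===== PORT B =====
-- inner while (j): length of the leading run of c, and the rest of the list
def pvTakeRun (c : Char) : List Char → Nat × List Char
  | [] => (0, [])
  | d :: ds => if d = c then ((pvTakeRun c ds).1 + 1, (pvTakeRun c ds).2) else (0, d :: ds)

theorem pvTakeRun_snd_length_le (c : Char) (l : List Char) :
    (pvTakeRun c l).2.length ≤ l.length := by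
  induction l with
  | nil => simp [pvTakeRun]
  | cons d ds ih =>
    by_cases h : d = c <;> simp [pvTakeRun, h]
    omega

-- outer while (i): the list of (char, run length) groups
def pvRunsOf : List Char → List (Char × Int)
  | [] => []
  | c :: rest => (c, ((pvTakeRun c rest).1 : Int) + 1) :: pvRunsOf (pvTakeRun c rest).2
termination_by l => l.length
decreasing_by
  have := pvTakeRun_snd_length_le c rest
  simp; omega

-- best, best_n = runs[0]; for c, m in runs[1:]: if m > best_n: best, best_n = c, m
-- none = Python's IndexError on runs[0] for an empty string (excluded by Pre_)
def pvBChar (s : String) : Option Char :=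
  match pvRunsOf (PySem.List.sorted s.toList (fun c => c) false) with
  | [] => none
  | r :: rest => some ((rest.foldl (fun b q => if q.2 > b.2 then q else b) r).1)

def max_freq_by_pos_alt (strings : List String) : String :=
  strings.foldl (fun out s =>
    match pvBChar s with
    | some c => out.push c
    | none => out) ""

-- ===== PRECONDITION & SPEC =====
-- Pre_ excludes lists containing an empty string, on which Python A raises ValueError
-- (max() of an empty dict) and Python B raises IndexError (runs[0]).
def Pre_max_freq_by_pos (strings : List String) : Prop := ∀ s ∈ strings, s ≠ ""
instance (strings : List String) : Decidable (Pre_max_freq_by_pos strings) := by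
  unfold Pre_max_freq_by_pos; infer_instance

def pvWitness_max_freq_by_pos : List String := ["aabab", "xy z!"]

def Spec_max_freq_by_pos (strings : List String) (out : String) : Prop := out = max_freq_by_pos_alt strings
instance (strings : List String) (out : String) : Decidable (Spec_max_freq_by_pos strings out) := by unfold Spec_max_freq_by_pos; infer_instance

-- ===== CLAIM (what is proved, stated in full; the proofs are below) =====
def Claim_equal_max_freq_by_pos : Prop := ∀ (strings : List String), Dom_max_freq_by_pos strings → Pre_max_freq_by_pos strings → Spec_max_freq_by_pos strings (max_freq_by_pos strings)

-- ===== LEMMAS AND PROOFS =====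

theorem pvTakeRun_replicate (c : Char) (l : List Char) :
    List.replicate (pvTakeRun c l).1 c ++ (pvTakeRun c l).2 = l := by
  induction l with
  | nil => simp [pvTakeRun]
  | cons d ds ih =>
    by_cases h : d = c
    · simp [pvTakeRun, h, List.replicate_succ, ih]
    · simp [pvTakeRun, h]

theorem pvTakeRun_not_mem (c : Char) (l : List Char)
    (hp : l.Pairwise (· ≤ ·)) (hle : ∀ x ∈ l, c ≤ x) :
    c ∉ (pvTakeRun c l).2 := by
  induction l with
  | nil => simp [pvTakeRun]
  | cons d ds ih =>
    rcases List.pairwise_cons.mp hp with ⟨hd, hp'⟩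
    by_cases h : d = c
    · simpa [pvTakeRun, h] using ih hp' (fun x hx => hle x (List.mem_cons_of_mem _ hx))
    · simp only [pvTakeRun, h, if_false]
      intro hc
      rcases List.mem_cons.mp hc with rfl | hc
      · exact h rfl
      · exact h (le_antisymm (hle d List.mem_cons_self) (hd c hc)).symm

theorem pvDiscard_of_not_mem (c : Char) (r : List Char) (h : c ∉ r) :
    (PySem.Set.ofList r).discard c = PySem.Set.ofList r := by
  unfold PySem.Set.discard
  rw [List.filter_eq_self]
  intro y hy
  have hy' : y ∈ r := (PySem.Set.mem_ofList r y).mp hy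
  have hne : y ≠ c := fun e => h (e ▸ hy')
  simp [hne]

theorem pvOfList_cons_cons (c : Char) (l : List Char) :
    PySem.Set.ofList (c :: c :: l) = PySem.Set.ofList (c :: l) := by
  simp [PySem.Set.ofList, PySem.Set.add, PySem.Set.empty]

theorem pvOfList_replicate_append (c : Char) (r : List Char) :
    ∀ n : Nat, PySem.Set.ofList (List.replicate (n + 1) c ++ r) = PySem.Set.ofList (c :: r) := by
  intro n
  induction n with
  | zero => rfl
  | succ n ih =>
    have : List.replicate (n + 1 + 1) c ++ r = c :: c :: (List.replicate n c ++ r) := by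
      simp [List.replicate_succ]
    rw [this, pvOfList_cons_cons]
    have : c :: (List.replicate n c ++ r) = List.replicate (n + 1) c ++ r := by
      simp [List.replicate_succ]
    rw [this, ih]

-- run-length groups of a sorted list = its distinct chars, each with its count
theorem pvRunsOf_eq (l : List Char) (hp : l.Pairwise (· ≤ ·)) :
    pvRunsOf l = (PySem.Set.ofList l).map (fun k => (k, (l.count k : Int))) := by
  induction l using pvRunsOf.induct with
  | case1 => simp [pvRunsOf]
  | case2 c rest ih =>
    rcases List.pairwise_cons.mp hp with ⟨hd, hp'⟩
    have hrest : List.replicate (pvTakeRun c rest).1 c ++ (pvTakeRun c rest).2 = rest :=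
      pvTakeRun_replicate c rest
    set n := (pvTakeRun c rest).1 with hn
    set r := (pvTakeRun c rest).2 with hr
    have hrp : r.Pairwise (· ≤ ·) := by
      have hsub : r.Sublist rest := by
        conv_rhs => rw [← hrest]
        exact List.sublist_append_right _ _
      exact hp'.sublist hsub
    have hcr : c ∉ r := pvTakeRun_not_mem c rest hp' hd
    have hfull : c :: rest = List.replicate (n + 1) c ++ r := by
      rw [← hrest]; simp [List.replicate_succ]
    -- distinct chars of c :: rest = c :: distinct chars of r
    have hset : PySem.Set.ofList (c :: rest) = c :: PySem.Set.ofList r := by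
      rw [hfull, pvOfList_replicate_append, PySem.Set.ofList_cons,
        pvDiscard_of_not_mem c r hcr]
    -- counts
    have hcount_c : (c :: rest).count c = n + 1 := by
      rw [hfull, List.count_append]
      simp [List.count_eq_zero_of_not_mem hcr]
    have hcount_k : ∀ k ∈ r, (c :: rest).count k = r.count k := by
      intro k hk
      have hkc : k ≠ c := fun h => hcr (h ▸ hk)
      have hck : (c == k) = false := by simpa using Ne.symm hkc
      rw [hfull, List.count_append, List.count_replicate]
      simp [hck]
    rw [pvRunsOf, hset, List.map_cons, hcount_c, ih hrp]
    refine congrArg₂ List.cons (by push_cast; rfl) ?_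
    refine (List.map_congr_left fun k hk => ?_).symm
    rw [hcount_k k ((PySem.Set.mem_ofList r k).mp hk)]

-- collapsing the first two candidates of Python's max scan
theorem pvMax?_cons_cons (g : Char → Int) (x y : Char) (t : List Char) :
    PySem.List.max? (x :: y :: t) g
      = PySem.List.max? ((if g x < g y then y else x) :: t) g := by
  by_cases h : g x < g y <;> simp [PySem.List.max?, h]

-- the first-strict-max fold over pairs computes Python max(keys, key) over their firsts
theorem pvFold_max (g : Char → Int) :
    ∀ (rest : List (Char × Int)) (b : Char × Int),
      (∀ p ∈ rest, g p.1 = p.2) → g b.1 = b.2 →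
      PySem.List.max? (b.1 :: rest.map Prod.fst) g
        = some ((rest.foldl (fun bb q => if q.2 > bb.2 then q else bb) b).1) := by
  intro rest
  induction rest with
  | nil =>
    intro b _ _
    simp [PySem.List.max?]
  | cons q t ih =>
    intro b hmem hb
    have hq : g q.1 = q.2 := hmem q List.mem_cons_self
    have ht : ∀ p ∈ t, g p.1 = p.2 := fun p hp => hmem p (List.mem_cons_of_mem _ hp)
    rw [List.map_cons, pvMax?_cons_cons, hb, hq]
    by_cases h : b.2 < q.2
    · rw [if_pos h]
      rw [List.foldl_cons, if_pos (show q.2 > b.2 from h)]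
      exact ih q ht hq
    · rw [if_neg h]
      rw [List.foldl_cons, if_neg (show ¬ q.2 > b.2 from h)]
      exact ih b ht hb

-- A's and B's choice of character agree on every string
theorem pvChar_eq (s : String) : pvAChar s = pvBChar s := by
  unfold pvAChar pvBChar pvACount
  set m := PySem.List.sorted s.toList (fun c => c) false with hm
  have hp : m.Pairwise (· ≤ ·) := by
    simpa using PySem.List.sorted_pairwise s.toList (fun c => c)
  rw [PySem.Dict.foldl_insert_getD_add_one_eq_counter, PySem.Dict.keys_counter]
  have hg : (fun k => (PySem.Dict.counter m).getD k 0) = fun k => ((m.count k : Int)) :=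
    funext fun k => PySem.Dict.getD_counter m k
  rw [hg, pvRunsOf_eq m hp]
  cases hS : PySem.Set.ofList m with
  | nil => simp [PySem.List.max?]
  | cons k0 ks =>
    simp only [List.map_cons]
    have hmap : (ks.map (fun k => (k, (m.count k : Int)))).map Prod.fst = ks := by
      rw [List.map_map]
      exact List.map_id ks
    have hfold := pvFold_max (fun k => (m.count k : Int))
      (ks.map (fun k => (k, (m.count k : Int)))) (k0, (m.count k0 : Int))
      (by intro p hp'; rcases List.mem_map.mp hp' with ⟨k, _, rfl⟩; rfl) rfl
    rw [hmap] at hfold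
    simpa using hfold

-- ===== VERDICT (by name: the statement is the Claim_ definition above) =====
theorem max_freq_by_pos_spec : Claim_equal_max_freq_by_pos := by
  intro strings _ _
  unfold Spec_max_freq_by_pos max_freq_by_pos max_freq_by_pos_alt
  rw [funext pvChar_eq]
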